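-- pv_equiv track=rewrite | github.com/vakovalskii/LocalClaw | core/tools/kanban.py | _fmt_tasks
-- ===== SOURCE A (Python) =====
-- def _fmt_tasks(tasks: list, column_filter: str | None = None) -> str:
--     if column_filter:
--         tasks = [t for t in tasks if t["column"] == column_filter]
--     if not tasks:
--         return "No tasks found."
--
--     cols: dict[str, list] = {}
--     for t in tasks:
--         cols.setdefault(t["column"], []).append(t)
--
--     lines = []
--     for col, items in cols.items():
--         lines.append(f"\n[{col.upper()}]")
--         for t in items:
--             agent = f" → {t['agent_emoji']} {t['agent_name']}" if t.get("agent_name") else " → (no agent)"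
--             status = f" [{t['status']}]" if t["status"] != "idle" else ""
--             lines.append(f"  #{t['id']} {t['title']}{agent}{status}")
--             if t.get("description"):
--                 lines.append(f"      {t['description'][:120]}")
--     return "\n".join(lines)
-- ===== SOURCE B (Python) =====
-- def _fmt_tasks(tasks: list, column_filter: str | None = None) -> str:
--     if column_filter:
--         tasks = [t for t in tasks if t["column"] == column_filter]
--     if not tasks:
--         return "No tasks found."
--
--     columns = list(dict.fromkeys(t["column"] for t in tasks))
--
--     lines = []
--     for col in columns:
--         lines.append(f"\n[{col.upper()}]")
--         for t in tasks:
--             if t["column"] == col: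
--                 lines.extend(_task_lines(t))
--     return "\n".join(lines)
--
--
-- def _task_lines(t: dict) -> list:
--     agent = f" → {t['agent_emoji']} {t['agent_name']}" if t.get("agent_name") else " → (no agent)"
--     status = f" [{t['status']}]" if t["status"] != "idle" else ""
--     out = [f"  #{t['id']} {t['title']}{agent}{status}"]
--     if t.get("description"):
--         out.append(f"      {t['description'][:120]}")
--     return out
-- ===== Notes on version B (the rewrite author's own statement) =====
-- stated objective: alternative
-- what changed: B replaces A's dict-of-lists grouping (setdefault/append then iterate items) by a one-pass ordered dedup of column names (dict.fromkeys) followed by a per-column rescan of the task list, with the per-task formatting factored into a helper.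
import Mathlib
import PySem

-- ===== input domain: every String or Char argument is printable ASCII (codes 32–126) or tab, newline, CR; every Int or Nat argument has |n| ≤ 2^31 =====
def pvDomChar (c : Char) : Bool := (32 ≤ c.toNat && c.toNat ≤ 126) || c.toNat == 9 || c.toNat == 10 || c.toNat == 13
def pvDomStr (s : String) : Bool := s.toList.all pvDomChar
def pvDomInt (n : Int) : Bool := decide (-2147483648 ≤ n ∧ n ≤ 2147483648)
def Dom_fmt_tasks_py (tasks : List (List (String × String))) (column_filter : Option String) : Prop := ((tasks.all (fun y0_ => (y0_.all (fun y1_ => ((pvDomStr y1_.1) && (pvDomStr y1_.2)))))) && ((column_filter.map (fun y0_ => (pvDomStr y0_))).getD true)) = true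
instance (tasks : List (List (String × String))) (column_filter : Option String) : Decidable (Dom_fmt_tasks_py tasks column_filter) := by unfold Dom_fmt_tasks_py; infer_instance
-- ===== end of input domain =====

-- B formats the same tasks by deduplicating column names in first-appearance order and
-- rescanning the task list per column, instead of A's dict-of-lists grouping; same output.
-- Tasks here are Python dicts, ported as association lists read through PySem.Dict
-- (duplicate keys: last value wins, as in dict(pairs)).

-- ===== PORT A =====
-- port of A; each t[k] is (Dict.ofList t).getD k "" — exact under Pre_ (key present);
-- t.get(k) truthiness is ((Dict.ofList t).get? k).getD "" ≠ "".
def fmt_tasks_py (tasks : List (List (String × String))) (column_filter : Option String) : String :=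
  let ts := match column_filter with
    | none => tasks
    | some s => if s = "" then tasks
                else tasks.filter (fun t => (PySem.Dict.ofList t).getD "column" "" == s)
  if ts.isEmpty then "No tasks found."
  else
    let cols := ts.foldl (fun d t =>
      d.modify ((PySem.Dict.ofList t).getD "column" "") [] (fun v => v ++ [t])) PySem.Dict.empty
    let lines := cols.items.foldl (fun lines ci =>
      ci.2.foldl (fun lines t =>
        let d := PySem.Dict.ofList t
        let agent := if ((d.get? "agent_name").getD "") ≠ "" then
            " → " ++ d.getD "agent_emoji" "" ++ " " ++ ((d.get? "agent_name").getD "")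
          else " → (no agent)"
        let status := if d.getD "status" "" ≠ "idle" then " [" ++ d.getD "status" "" ++ "]" else ""
        let lines := lines ++ ["  #" ++ d.getD "id" "" ++ " " ++ d.getD "title" "" ++ agent ++ status]
        if ((d.get? "description").getD "") ≠ "" then
          lines ++ ["      " ++ PySem.Str.slice ((d.get? "description").getD "") none (some 120)]
        else lines)
        (lines ++ ["\n[" ++ PySem.Str.upper ci.1 ++ "]"])) []
    PySem.Str.join "\n" lines

-- ===== PORT B =====
-- port of Source B's _task_lines
def task_lines_py (t : List (String × String)) : List String :=
  let d := PySem.Dict.ofList t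
  let agent := if ((d.get? "agent_name").getD "") ≠ "" then
      " → " ++ d.getD "agent_emoji" "" ++ " " ++ ((d.get? "agent_name").getD "")
    else " → (no agent)"
  let status := if d.getD "status" "" ≠ "idle" then " [" ++ d.getD "status" "" ++ "]" else ""
  let out := ["  #" ++ d.getD "id" "" ++ " " ++ d.getD "title" "" ++ agent ++ status]
  if ((d.get? "description").getD "") ≠ "" then
    out ++ ["      " ++ PySem.Str.slice ((d.get? "description").getD "") none (some 120)]
  else out

def fmt_tasks_py_alt (tasks : List (List (String × String))) (column_filter : Option String) : String :=
  let ts := match column_filter with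
    | none => tasks
    | some s => if s = "" then tasks
                else tasks.filter (fun t => (PySem.Dict.ofList t).getD "column" "" == s)
  if ts.isEmpty then "No tasks found."
  else
    -- list(dict.fromkeys(t["column"] for t in tasks))
    let columns := PySem.List.dedup (ts.map (fun t => (PySem.Dict.ofList t).getD "column" ""))
    let lines := columns.foldl (fun lines col =>
      ts.foldl (fun lines t =>
        if (PySem.Dict.ofList t).getD "column" "" == col then lines ++ task_lines_py t else lines)
        (lines ++ ["\n[" ++ PySem.Str.upper col ++ "]"])) []
    PySem.Str.join "\n" lines

-- ===== PRECONDITION & SPEC =====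
def pvActive (column_filter : Option String) : Bool := column_filter.getD "" ≠ ""
def pvKeep (column_filter : Option String) (t : List (String × String)) : Bool :=
  !pvActive column_filter || ((PySem.Dict.ofList t).getD "column" "" == column_filter.getD "")

-- Pre_: exactly where A returns without a KeyError — every task has a "column" key, and every
-- task surviving the filter has "status", "id", "title", plus "agent_emoji" if its
-- "agent_name" is present and non-empty.
def Pre_fmt_tasks_py (tasks : List (List (String × String))) (column_filter : Option String) : Prop :=
  (∀ t ∈ tasks, (PySem.Dict.ofList t).contains "column" = true) ∧
  (∀ t ∈ tasks, pvKeep column_filter t = true →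
    (PySem.Dict.ofList t).contains "status" = true ∧
    (PySem.Dict.ofList t).contains "id" = true ∧
    (PySem.Dict.ofList t).contains "title" = true ∧
    (((PySem.Dict.ofList t).get? "agent_name").getD "" ≠ "" →
      (PySem.Dict.ofList t).contains "agent_emoji" = true))
instance (tasks : List (List (String × String))) (column_filter : Option String) : Decidable (Pre_fmt_tasks_py tasks column_filter) := by unfold Pre_fmt_tasks_py; infer_instance

def pvWitness_fmt_tasks_py : (List (List (String × String))) × Option String :=
  ([[("column", "a"), ("status", "idle"), ("id", "1"), ("title", "t")]], none)

def Spec_fmt_tasks_py (tasks : List (List (String × String))) (column_filter : Option String) (out : String) : Prop := out = fmt_tasks_py_alt tasks column_filter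
instance (tasks : List (List (String × String))) (column_filter : Option String) (out : String) : Decidable (Spec_fmt_tasks_py tasks column_filter out) := by unfold Spec_fmt_tasks_py; infer_instance

-- ===== CLAIM (what is proved, stated in full; the proofs are below) =====
def Claim_equal_fmt_tasks_py : Prop := ∀ (tasks : List (List (String × String))) (column_filter : Option String), Dom_fmt_tasks_py tasks column_filter → Pre_fmt_tasks_py tasks column_filter → Spec_fmt_tasks_py tasks column_filter (fmt_tasks_py tasks column_filter)

-- ===== LEMMAS AND PROOFS =====

-- a fold whose step appends F a to the accumulator flat-maps F
theorem pv_foldl_abs {α β : Type} (step : List β → α → List β) (F : α → List β)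
    (h : ∀ ls a, step ls a = ls ++ F a) :
    ∀ (l : List α) (acc : List β), l.foldl step acc = acc ++ l.flatMap F := by
  intro l
  induction l with
  | nil => intro acc; simp
  | cons x xs ih => intro acc; simp [List.foldl_cons, h, ih, List.append_assoc]

theorem pv_foldl_extend_if {α β : Type} (p : α → Bool) (g : α → List β)
    (l : List α) (acc : List β) :
    l.foldl (fun ls t => if p t then ls ++ g t else ls) acc
      = acc ++ (l.filter p).flatMap g := by
  induction l generalizing acc with
  | nil => simp
  | cons x xs ih =>
    by_cases hp : p x = true <;> simp [List.foldl_cons, hp, ih, List.append_assoc]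

-- the group A stores under key c is the sublist of tasks whose column is c
theorem pv_group_eq (ts : List (List (String × String))) (c : String) :
    (ts.foldl (fun d t =>
        d.modify ((PySem.Dict.ofList t).getD "column" "") [] (fun v => v ++ [t]))
        PySem.Dict.empty).getD c []
      = ts.filter (fun t => (PySem.Dict.ofList t).getD "column" "" == c) := by
  have h : ts.foldl (fun d t =>
        d.modify ((PySem.Dict.ofList t).getD "column" "") [] (fun v => v ++ [t]))
        PySem.Dict.empty
      = (ts.map (fun t => ((PySem.Dict.ofList t).getD "column" "", t))).foldl
          (fun d p => d.modify p.1 [] (fun v => v ++ [p.2])) PySem.Dict.empty := by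
    rw [List.foldl_map]
  rw [h, PySem.Dict.getD_foldl_modify_append]
  simp [List.filter_map, Function.comp_def]

-- the keys of A's grouping dict, in order, are B's deduplicated column list
theorem pv_keys_eq (ts : List (List (String × String))) :
    (ts.foldl (fun d t =>
        d.modify ((PySem.Dict.ofList t).getD "column" "") [] (fun v => v ++ [t]))
        PySem.Dict.empty).keys
      = PySem.List.dedup (ts.map (fun t => (PySem.Dict.ofList t).getD "column" "")) := by
  rw [PySem.Dict.keys_foldl_modify_key ts
    (fun t => (PySem.Dict.ofList t).getD "column" "") [] (fun _ t v => v ++ [t])]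
  simp [PySem.Dict.keys_empty, PySem.List.dedup_eq_ofList, PySem.Set.update, PySem.Set.ofList]

theorem pv_keys_nodup (ts : List (List (String × String))) :
    (ts.foldl (fun d t =>
        d.modify ((PySem.Dict.ofList t).getD "column" "") [] (fun v => v ++ [t]))
        PySem.Dict.empty).keys.Nodup :=
  PySem.Dict.nodup_keys_foldl_modify_key ts
    (fun t => (PySem.Dict.ofList t).getD "column" "") [] (fun _ t v => v ++ [t])
    PySem.Dict.empty (by simp [PySem.Dict.keys_empty])

def pvF (ts : List (List (String × String))) (col : String) : List String :=
  ["\n[" ++ PySem.Str.upper col ++ "]"]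
    ++ (ts.filter (fun t => (PySem.Dict.ofList t).getD "column" "" == col)).flatMap task_lines_py

-- A's inner loop body appends exactly task_lines_py t
theorem pv_stepA_eq (ls : List String) (t : List (String × String)) :
    (let d := PySem.Dict.ofList t
     let agent := if ((d.get? "agent_name").getD "") ≠ "" then
         " → " ++ d.getD "agent_emoji" "" ++ " " ++ ((d.get? "agent_name").getD "")
       else " → (no agent)"
     let status := if d.getD "status" "" ≠ "idle" then " [" ++ d.getD "status" "" ++ "]" else ""
     let ls := ls ++ ["  #" ++ d.getD "id" "" ++ " " ++ d.getD "title" "" ++ agent ++ status]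
     if ((d.get? "description").getD "") ≠ "" then
       ls ++ ["      " ++ PySem.Str.slice ((d.get? "description").getD "") none (some 120)]
     else ls)
      = ls ++ task_lines_py t := by
  simp only [task_lines_py]
  split <;> simp [List.append_assoc]

theorem pv_lines_eq (ts : List (List (String × String))) :
    (ts.foldl (fun d t =>
        d.modify ((PySem.Dict.ofList t).getD "column" "") [] (fun v => v ++ [t]))
        PySem.Dict.empty).items.foldl (fun lines ci =>
      ci.2.foldl (fun lines t =>
        let d := PySem.Dict.ofList t
        let agent := if ((d.get? "agent_name").getD "") ≠ "" then
            " → " ++ d.getD "agent_emoji" "" ++ " " ++ ((d.get? "agent_name").getD "")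
          else " → (no agent)"
        let status := if d.getD "status" "" ≠ "idle" then " [" ++ d.getD "status" "" ++ "]" else ""
        let lines := lines ++ ["  #" ++ d.getD "id" "" ++ " " ++ d.getD "title" "" ++ agent ++ status]
        if ((d.get? "description").getD "") ≠ "" then
          lines ++ ["      " ++ PySem.Str.slice ((d.get? "description").getD "") none (some 120)]
        else lines)
        (lines ++ ["\n[" ++ PySem.Str.upper ci.1 ++ "]"])) []
    = (PySem.List.dedup (ts.map (fun t => (PySem.Dict.ofList t).getD "column" ""))).foldl
        (fun lines col =>
          ts.foldl (fun lines t =>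
            if (PySem.Dict.ofList t).getD "column" "" == col then lines ++ task_lines_py t
            else lines)
            (lines ++ ["\n[" ++ PySem.Str.upper col ++ "]"])) [] := by
  set cols := ts.foldl (fun d t =>
      d.modify ((PySem.Dict.ofList t).getD "column" "") [] (fun v => v ++ [t]))
      PySem.Dict.empty with hcols
  have hitems := PySem.Dict.items_eq_map_keys cols (pv_keys_nodup ts) []
  rw [hitems, pv_keys_eq ts, List.foldl_map]
  rw [pv_foldl_abs _ (pvF ts), pv_foldl_abs _ (pvF ts)]
  · intro ls col
    rw [pv_foldl_extend_if]
    simp [pvF, List.append_assoc]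
  · intro ls col
    have hinner := pv_foldl_abs
      (fun lines t =>
        let d := PySem.Dict.ofList t
        let agent := if ((d.get? "agent_name").getD "") ≠ "" then
            " → " ++ d.getD "agent_emoji" "" ++ " " ++ ((d.get? "agent_name").getD "")
          else " → (no agent)"
        let status := if d.getD "status" "" ≠ "idle" then " [" ++ d.getD "status" "" ++ "]" else ""
        let lines := lines ++ ["  #" ++ d.getD "id" "" ++ " " ++ d.getD "title" "" ++ agent ++ status]
        if ((d.get? "description").getD "") ≠ "" then
          lines ++ ["      " ++ PySem.Str.slice ((d.get? "description").getD "") none (some 120)]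
        else lines)
      task_lines_py pv_stepA_eq
    rw [hinner, pv_group_eq ts col]
    simp [pvF, List.append_assoc]

-- ===== VERDICT (by name: the statement is the Claim_ definition above) =====
theorem fmt_tasks_py_spec : Claim_equal_fmt_tasks_py := by
  intro tasks column_filter _ _
  unfold Spec_fmt_tasks_py fmt_tasks_py fmt_tasks_py_alt
  cases column_filter with
  | none =>
    simp only
    split
    · rfl
    · rw [pv_lines_eq]
  | some s =>
    by_cases hs : s = "" <;> simp only [hs, if_true, if_false] <;>
      (split
       · rfl
       · rw [pv_lines_eq])
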